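-- pv_equiv track=rewrite | github.com/caelinp/AdventOfCode | dec13/dec13.py | get_above_value
-- ===== SOURCE A (Python) =====
-- def get_above_value(pattern):
--     for i in range(len(pattern) - 1):
--         u, d = i, i + 1
--         mirror = True
--         while u >= 0 and d < len(pattern):
--             if pattern[u] != pattern[d]:
--                 mirror = False
--                 break
--             u -= 1
--             d += 1
--         if mirror:
--             return i + 1
--     return 0
-- ===== SOURCE B (Python) =====
-- def get_above_value(pattern):
--     n = len(pattern)
--     # intern each distinct row as the index of its first occurrence (one dict pass),
--     # then find the first boundary whose reflection (a slice vs reversed slice of int ids) reaches an edge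
--     ids = {}
--     for idx, r in enumerate(pattern):
--         if r not in ids:
--             ids[r] = idx
--     rows = [ids[r] for r in pattern]
--     for i in range(n - 1):
--         k = min(i + 1, n - 1 - i)
--         if rows[i + 1 : i + 1 + k] == rows[i - k + 1 : i + 1][::-1]:
--             return i + 1
--     return 0
-- ===== Notes on version B (the rewrite author's own statement) =====
-- stated objective: alternative
-- what changed: B first interns every row once in a dict mapping each distinct row to its first-occurrence index, and then decides each candidate boundary by comparing a slice of the small int ids with a reversed slice, instead of A's per-boundary two-pointer walk that re-compares whole row strings.
import Mathlib
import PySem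

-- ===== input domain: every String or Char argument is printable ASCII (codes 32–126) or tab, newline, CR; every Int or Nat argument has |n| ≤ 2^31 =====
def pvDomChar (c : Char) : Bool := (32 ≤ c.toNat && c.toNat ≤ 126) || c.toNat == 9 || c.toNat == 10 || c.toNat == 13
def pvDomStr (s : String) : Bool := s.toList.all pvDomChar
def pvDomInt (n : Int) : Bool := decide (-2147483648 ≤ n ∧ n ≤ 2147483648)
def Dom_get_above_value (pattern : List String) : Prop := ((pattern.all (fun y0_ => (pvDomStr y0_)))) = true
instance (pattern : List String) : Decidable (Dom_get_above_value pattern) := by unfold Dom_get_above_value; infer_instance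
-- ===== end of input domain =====

-- B interns rows as first-occurrence indices in one dict pass, then compares a slice with a reversed slice at each boundary (objective: alternative).
-- Loops are ported with a structural fuel argument that is always sufficient (a totality guard only, not a change of algorithm).

-- ===== PORT A =====
-- the inner 'while u >= 0 and d < len(pattern)' loop (returns the final value of 'mirror');
-- fuel ≥ u+2 at every call site, so the loop always exits through its own condition
def aWhile (pattern : List String) : Nat → Int → Int → Bool
  | 0, _, _ => true
  | fuel + 1, u, d =>
    if 0 ≤ u ∧ d < (pattern.length : Int) then
      if PySem.List.pyGet? pattern u ≠ PySem.List.pyGet? pattern d then false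
      else aWhile pattern fuel (u - 1) (d + 1)
    else true

-- the outer 'for i in range(len(pattern) - 1)' loop with its early return; fuel = len(pattern) suffices
def aOuter (pattern : List String) : Nat → Int → Int
  | 0, _ => 0
  | fuel + 1, i =>
    if i < (pattern.length : Int) - 1 then
      if aWhile pattern (pattern.length + 1) i (i + 1) then i + 1 else aOuter pattern fuel (i + 1)
    else 0

def get_above_value (pattern : List String) : Int := aOuter pattern pattern.length 0

-- ===== PORT B =====
-- the 'for idx, r in enumerate(pattern): if r not in ids: ids[r] = idx' loop
def bIds (l : List String) (idx : Int) (d : PySem.Dict String Int) : PySem.Dict String Int :=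
  match l with
  | [] => d
  | r :: rest => bIds rest (idx + 1) (if d.contains r then d else d.insert r idx)

-- the 'for i in range(n - 1)' loop with its early return (fuel = n suffices);
-- rows[...][::-1] is List.reverse (PySem.List.slice?_none_none_neg_one)
def bLoop (rows : List Int) (n : Int) : Nat → Int → Int
  | 0, _ => 0
  | fuel + 1, i =>
    if i < n - 1 then
      let k := min (i + 1) (n - 1 - i)
      if PySem.List.slice rows (some (i + 1)) (some (i + 1 + k))
          = (PySem.List.slice rows (some (i - k + 1)) (some (i + 1))).reverse
      then i + 1 else bLoop rows n fuel (i + 1)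
    else 0

def get_above_value_alt (pattern : List String) : Int :=
  let n : Int := pattern.length
  let ids := bIds pattern 0 PySem.Dict.empty
  let rows := pattern.map (fun r => ids.getD r 0)   -- ids[r]: r is always a key of ids
  bLoop rows n pattern.length 0

-- ===== PRECONDITION & SPEC =====
def Spec_get_above_value (pattern : List String) (out : Int) : Prop := out = get_above_value_alt pattern
instance (pattern : List String) (out : Int) : Decidable (Spec_get_above_value pattern out) := by unfold Spec_get_above_value; infer_instance

-- ===== CLAIM (what is proved, stated in full; the proofs are below) =====
def Claim_equal_get_above_value : Prop := ∀ (pattern : List String), Dom_get_above_value pattern → Spec_get_above_value pattern (get_above_value pattern)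

-- ===== LEMMAS AND PROOFS =====

-- the interning dict maps each string to (idx + index of its first occurrence), unless already bound in d
theorem bIds_get? (l : List String) (idx : Int) (d : PySem.Dict String Int) (r : String) :
    (bIds l idx d).get? r =
      match d.get? r with
      | some v => some v
      | none => if r ∈ l then some (idx + (l.idxOf r : Int)) else none := by
  induction l generalizing idx d with
  | nil => cases h : d.get? r <;> simp [bIds, h]
  | cons s rest ih =>
    by_cases hc : d.contains s = true
    · rw [show bIds (s :: rest) idx d = bIds rest (idx + 1) d from by simp [bIds, hc]]
      rw [ih]
      cases hdr : d.get? r with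
      | some v => simp
      | none =>
        have hrs : r ≠ s := by
          rintro rfl
          rw [PySem.Dict.contains_eq_isSome_get?, hdr] at hc; simp at hc
        simp only [List.mem_cons, hrs, false_or, List.idxOf_cons_ne _ (Ne.symm hrs)]
        split_ifs with hm
        · congr 1; push_cast; ring
        · rfl
    · rw [show bIds (s :: rest) idx d = bIds rest (idx + 1) (d.insert s idx) from by simp [bIds, hc]]
      rw [ih]
      by_cases hrs : r = s
      · subst hrs
        have hdr : d.get? r = none := by
          rw [PySem.Dict.contains_eq_isSome_get?] at hc
          cases h : d.get? r with
          | none => rfl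
          | some v => rw [h] at hc; simp at hc
        simp [PySem.Dict.get?_insert_self, hdr, List.idxOf_cons_self]
      · have hins : (d.insert s idx).get? r = d.get? r := by
          rw [PySem.Dict.get?_insert]; simp [hrs]
        rw [hins]
        cases hdr : d.get? r with
        | some v => simp
        | none =>
          simp only [List.mem_cons, hrs, false_or, List.idxOf_cons_ne _ (Ne.symm hrs)]
          split_ifs with hm
          · congr 1; push_cast; ring
          · rfl

theorem rows_getD (pattern : List String) (j : Nat) (hj : j < pattern.length) :
    (pattern.map (fun r => (bIds pattern 0 PySem.Dict.empty).getD r 0))[j]? =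
      some ((pattern.idxOf pattern[j] : Int)) := by
  have hm : pattern[j] ∈ pattern := List.getElem_mem hj
  have h1 := bIds_get? pattern 0 PySem.Dict.empty pattern[j]
  rw [PySem.Dict.get?_empty] at h1
  simp only [hm, if_true, zero_add] at h1
  simp [List.getElem?_map, List.getElem?_eq_getElem hj, PySem.Dict.getD_eq_get?_getD, h1]

theorem rows_inj (pattern : List String) (a b : Nat) (ha : a < pattern.length) (hb : b < pattern.length) :
    ((pattern.map (fun r => (bIds pattern 0 PySem.Dict.empty).getD r 0))[a]? =
     (pattern.map (fun r => (bIds pattern 0 PySem.Dict.empty).getD r 0))[b]?) ↔ (pattern[a]? = pattern[b]?) := by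
  rw [rows_getD pattern a ha, rows_getD pattern b hb,
      List.getElem?_eq_getElem ha, List.getElem?_eq_getElem hb]
  constructor
  · intro h
    have h2 : pattern.idxOf pattern[a] = pattern.idxOf pattern[b] := by
      have := Option.some.inj h
      exact_mod_cast this
    have la := List.idxOf_lt_length_of_mem (List.getElem_mem ha)
    have lb := List.idxOf_lt_length_of_mem (List.getElem_mem hb)
    have e1 : pattern[pattern.idxOf pattern[a]]? = some pattern[a] := by
      rw [List.getElem?_eq_getElem la, List.getElem_idxOf la]
    have e2 : pattern[pattern.idxOf pattern[b]]? = some pattern[b] := by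
      rw [List.getElem?_eq_getElem lb, List.getElem_idxOf lb]
    rw [h2, e2] at e1
    exact congrArg _ (Option.some.inj e1).symm
  · intro h
    rw [Option.some.inj h]

-- characterization of A's inner while loop, for any sufficient fuel
theorem aWhile_iff (pattern : List String) : ∀ (m : Nat) (u d : Int), (u + 1).toNat ≤ m →
    (aWhile pattern m u d = true ↔
      ∀ t : Nat, (t : Int) ≤ u → d + (t : Int) < (pattern.length : Int) →
        PySem.List.pyGet? pattern (u - t) = PySem.List.pyGet? pattern (d + t)) := by
  intro m
  induction m with
  | zero =>
    intro u d hm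
    refine ⟨fun _ t ht1 ht2 => absurd ht1 (by omega), fun _ => rfl⟩
  | succ m ih =>
    intro u d hm
    simp only [aWhile]
    by_cases h : 0 ≤ u ∧ d < (pattern.length : Int)
    · rw [if_pos h]
      by_cases hne : PySem.List.pyGet? pattern u ≠ PySem.List.pyGet? pattern d
      · rw [if_pos hne]
        constructor
        · intro hff; simp at hff
        · intro hall
          exact absurd (by simpa using hall 0 (by exact_mod_cast h.1) (by simpa using h.2)) hne
      · rw [if_neg hne]
        rw [not_ne_iff] at hne
        rw [ih (u - 1) (d + 1) (by omega)]
        constructor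
        · intro hall t ht1 ht2
          cases t with
          | zero => simpa using hne
          | succ t' =>
            have e1 : u - ((t' + 1 : Nat) : Int) = u - 1 - (t' : Int) := by push_cast; ring
            have e2 : d + ((t' + 1 : Nat) : Int) = d + 1 + (t' : Int) := by push_cast; ring
            rw [e1, e2]
            exact hall t' (by omega) (by omega)
        · intro hall t ht1 ht2
          have e1 : u - 1 - (t : Int) = u - ((t + 1 : Nat) : Int) := by push_cast; ring
          have e2 : d + 1 + (t : Int) = d + ((t + 1 : Nat) : Int) := by push_cast; ring
          rw [e1, e2]
          exact hall (t + 1) (by omega) (by omega)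
    · rw [if_neg h]
      refine ⟨fun _ t ht1 ht2 => absurd ht1 (by omega), fun _ => rfl⟩

-- characterization of B's slice comparison
theorem slices_iff (rows : List Int) (i kN : Nat) (hk1 : kN ≤ i + 1) (hk2 : i + 1 + kN ≤ rows.length) :
    (PySem.List.slice rows (some ((i : Int) + 1)) (some ((i : Int) + 1 + (kN : Int)))
        = (PySem.List.slice rows (some ((i : Int) - (kN : Int) + 1)) (some ((i : Int) + 1))).reverse) ↔
      ∀ t : Nat, t < kN → rows[i + 1 + t]? = rows[i - t]? := by
  have e1 : (i : Int) + 1 = ((i + 1 : Nat) : Int) := by omega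
  have e2 : (i : Int) + 1 + (kN : Int) = ((i + 1 + kN : Nat) : Int) := by omega
  have e3 : (i : Int) - (kN : Int) + 1 = ((i + 1 - kN : Nat) : Int) := by omega
  rw [e2, e3, e1, PySem.List.slice_natCast, PySem.List.slice_natCast]
  rw [show i + 1 + kN - (i + 1) = kN from by omega, show i + 1 - (i + 1 - kN) = kN from by omega]
  have hA : ((rows.drop (i + 1)).take kN).length = kN := by
    simp [List.length_take, List.length_drop]; omega
  have hB : ((rows.drop (i + 1 - kN)).take kN).length = kN := by
    simp [List.length_take, List.length_drop]; omega
  have hAe : ∀ t : Nat, t < kN → ((rows.drop (i + 1)).take kN)[t]? = rows[i + 1 + t]? := by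
    intro t ht
    rw [List.getElem?_take_of_lt ht, List.getElem?_drop]
  have hBe : ∀ t : Nat, t < kN → ((rows.drop (i + 1 - kN)).take kN).reverse[t]? = rows[i - t]? := by
    intro t ht
    rw [List.getElem?_reverse (by rw [hB]; exact ht), hB]
    rw [List.getElem?_take_of_lt (by omega), List.getElem?_drop]
    congr 1; omega
  constructor
  · intro heq t ht
    rw [← hAe t ht, ← hBe t ht, heq]
  · intro hall
    apply List.ext_getElem?
    intro t
    by_cases ht : t < kN
    · rw [hAe t ht, hBe t ht]; exact hall t ht
    · rw [List.getElem?_eq_none (by rw [hA]; omega),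
          List.getElem?_eq_none (by rw [List.length_reverse, hB]; omega)]

theorem loops_eq (pattern : List String) : ∀ (m : Nat) (i : Int), 0 ≤ i →
    aOuter pattern m i = bLoop (pattern.map (fun r => (bIds pattern 0 PySem.Dict.empty).getD r 0)) (pattern.length) m i := by
  intro m
  induction m with
  | zero => intro i hi; rfl
  | succ m ih =>
    intro i hi
    simp only [aOuter, bLoop]
    by_cases hlt : i < (pattern.length : Int) - 1
    · rw [if_pos hlt, if_pos hlt]
      set rows := pattern.map (fun r => (bIds pattern 0 PySem.Dict.empty).getD r 0) with hrowsdef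
      have hrlen : rows.length = pattern.length := by simp [hrowsdef]
      set iN := i.toNat with hiNdef
      have hi' : i = (iN : Int) := by omega
      set kN : Nat := min (iN + 1) (pattern.length - 1 - iN) with hkNdef
      have hk : min (i + 1) ((pattern.length : Int) - 1 - i) = (kN : Int) := by omega
      have hk1 : kN ≤ iN + 1 := by omega
      have hk2 : iN + 1 + kN ≤ rows.length := by rw [hrlen]; omega
      have hcond : (aWhile pattern (pattern.length + 1) i (i + 1) = true) ↔
          (PySem.List.slice rows (some ((iN : Int) + 1)) (some ((iN : Int) + 1 + (kN : Int)))
            = (PySem.List.slice rows (some ((iN : Int) - (kN : Int) + 1)) (some ((iN : Int) + 1))).reverse) := by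
        rw [aWhile_iff pattern (pattern.length + 1) i (i + 1) (by omega)]
        rw [slices_iff rows iN kN hk1 hk2]
        constructor
        · intro H t ht
          rw [rows_inj pattern _ _ (by omega) (by omega)]
          have h1 : (t : Int) ≤ i := by omega
          have h2 : i + 1 + (t : Int) < (pattern.length : Int) := by omega
          have := H t h1 (by omega)
          rw [show i - (t : Int) = ((iN - t : Nat) : Int) from by omega,
              show i + 1 + (t : Int) = ((iN + 1 + t : Nat) : Int) from by omega] at this
          rw [PySem.List.pyGet?_natCast, PySem.List.pyGet?_natCast] at this
          exact this.symm
        · intro H t h1 h2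
          have ht : t < kN := by omega
          have := (rows_inj pattern (iN + 1 + t) (iN - t) (by omega) (by omega)).mp (H t ht)
          rw [show i - (t : Int) = ((iN - t : Nat) : Int) from by omega,
              show i + 1 + (t : Int) = ((iN + 1 + t : Nat) : Int) from by omega]
          rw [PySem.List.pyGet?_natCast, PySem.List.pyGet?_natCast]
          exact this.symm
      rw [hk, hi']
      by_cases hw : aWhile pattern (pattern.length + 1) i (i + 1) = true
      · rw [hi'] at hw
        rw [if_pos hw, if_pos ((hcond.mp (by rw [hi']; exact hw)))]
      · rw [hi'] at hw
        rw [if_neg hw, if_neg (fun hc => hw (by rw [← hi'] at hc ⊢; exact hcond.mpr (by rw [hi'] at hc; exact hc)))]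
        rw [← hi']
        exact ih (i + 1) (by omega)
    · rw [if_neg hlt, if_neg hlt]

-- ===== VERDICT (by name: the statement is the Claim_ definition above) =====
theorem get_above_value_spec : Claim_equal_get_above_value := by
  intro pattern _
  unfold Spec_get_above_value get_above_value get_above_value_alt
  exact loops_eq pattern pattern.length 0 le_rfl
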